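-- pv_equiv track=rewrite | github.com/Sandeshb24/Workout-planner | streamlit_app.py | maintenance_plan
-- ===== SOURCE A (Python) =====
-- def equipment_level(equipment_choice):
--     """Maps equipment choice number to a descriptive string."""
--     if equipment_choice == 1:
--         return "no equipment"
--     elif equipment_choice == 2:
--         return "basic equipment (dumbbells, resistance bands)"
--     elif equipment_choice == 3:
--         return "full gym access"
--     return "unknown equipment" # Fallback
--
-- def maintenance_plan(workout_plan_dict, workout_type, time_available, experience_level, equipment):
--     """Generates a maintenance plan based on user preferences."""
--     cardio_options = [
--         "moderate cardio (e.g., jogging, cycling, brisk walking)", "recreational sports (e.g., basketball, tennis)",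
--         "hiking or trail walking", "dancing or active games", "swimming or water aerobics"
--     ]
--     strength_options = [
--         f"balanced strength and endurance training with {equipment_level(equipment)} (e.g., compound lifts with moderate weight)",
--         f"full-body resistance training with {equipment_level(equipment)} for muscle tone",
--         f"functional strength exercises to improve daily movement with {equipment_level(equipment)}",
--         f"circuit workout blending strength and cardio with {equipment_level(equipment)}",
--         f"core and stability training with {equipment_level(equipment)}"
--     ]
--     flexibility_options = [
--         "mixed stretching and light cardio for overall mobility", "Pilates or Barre for core and flexibility",
--         "restorative yoga or deep stretching for recovery", "active recovery walks with light stretching"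
--     ]
--     hiit_options = [
--         "short HIIT session for cardiovascular health and metabolism boost",
--         "sprint intervals or jump rope drills", "bodyweight HIIT with active rest",
--         "circuit of cardio and bodyweight strength intervals"
--     ]
--     mixed_options = [
--         f"{time_available // 2} minutes of cardio and {time_available // 2} minutes of strength maintenance",
--         f"balanced workout with a mix of endurance and light resistance",
--         f"active recovery day with light cardio and stretching",
--         f"cross-training session (e.g., swim + bodyweight strength)",
--         f"light gym session with focus on form and controlled movements"
--     ]
--
--     day_index = 0
--     for day in workout_plan_dict:
--         if workout_type == 1:  # Cardio
--             workout_plan_dict[day] = [f"{time_available} minutes of {cardio_options[day_index % len(cardio_options)]}"]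
--         elif workout_type == 2:  # Strength Training
--             workout_plan_dict[day] = [f"{time_available} minutes of {strength_options[day_index % len(strength_options)]}"]
--         elif workout_type == 3:  # Flexibility
--             workout_plan_dict[day] = [f"{time_available} minutes of {flexibility_options[day_index % len(flexibility_options)]}"]
--         elif workout_type == 4:  # HIIT
--             workout_plan_dict[day] = [f"{time_available // 2} minutes of {hiit_options[day_index % len(hiit_options)]} and {time_available // 2} minutes of endurance training or active recovery"]
--         elif workout_type == 5:  # Mixed
--             workout_plan_dict[day] = [f"{mixed_options[day_index % len(mixed_options)]}"]
--         day_index += 1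
--     return workout_plan_dict
-- ===== SOURCE B (Python) =====
-- def maintenance_plan(workout_plan_dict, workout_type, time_available, experience_level, equipment):
--     """Bulk strategy: pick the option table for the workout type from a dict, expand it to
--     one finished description per day by list repetition and slicing (no per-day counter,
--     branch or modulo), then assign every day at once with a single dict.update over the
--     zipped (day, description) pairs.  Mutates workout_plan_dict in place, like A."""
--     eq = {1: "no equipment",
--           2: "basic equipment (dumbbells, resistance bands)",
--           3: "full gym access"}.get(equipment, "unknown equipment")
--     half = time_available // 2
--     tables = {
--         1: [f"{time_available} minutes of {o}" for o in [
--             "moderate cardio (e.g., jogging, cycling, brisk walking)",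
--             "recreational sports (e.g., basketball, tennis)",
--             "hiking or trail walking", "dancing or active games",
--             "swimming or water aerobics"]],
--         2: [f"{time_available} minutes of {o}" for o in [
--             f"balanced strength and endurance training with {eq} (e.g., compound lifts with moderate weight)",
--             f"full-body resistance training with {eq} for muscle tone",
--             f"functional strength exercises to improve daily movement with {eq}",
--             f"circuit workout blending strength and cardio with {eq}",
--             f"core and stability training with {eq}"]],
--         3: [f"{time_available} minutes of {o}" for o in [
--             "mixed stretching and light cardio for overall mobility",
--             "Pilates or Barre for core and flexibility",
--             "restorative yoga or deep stretching for recovery",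
--             "active recovery walks with light stretching"]],
--         4: [f"{half} minutes of {o} and {half} minutes of endurance training or active recovery" for o in [
--             "short HIIT session for cardiovascular health and metabolism boost",
--             "sprint intervals or jump rope drills", "bodyweight HIIT with active rest",
--             "circuit of cardio and bodyweight strength intervals"]],
--         5: [f"{half} minutes of cardio and {half} minutes of strength maintenance",
--             "balanced workout with a mix of endurance and light resistance",
--             "active recovery day with light cardio and stretching",
--             "cross-training session (e.g., swim + bodyweight strength)",
--             "light gym session with focus on form and controlled movements"],
--     }
--     cycle = tables.get(workout_type)
--     if cycle is None:
--         return workout_plan_dict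
--     days = list(workout_plan_dict)
--     descs = (cycle * (len(days) // len(cycle) + 1))[:len(days)]
--     workout_plan_dict.update((day, [d]) for day, d in zip(days, descs))
--     return workout_plan_dict
-- ===== Notes on version B (the rewrite author's own statement) =====
-- stated objective: alternative
-- what changed: B replaces A's per-day loop (counter, 5-way branch and modular indexing on every iteration) by a bulk construction: it selects the finished description table from a dict, expands it to exactly one description per day via list repetition and slicing (cycle * k)[:n], and assigns all days at once with a single dict.update over the zipped (day, description) pairs.
import Mathlib
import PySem

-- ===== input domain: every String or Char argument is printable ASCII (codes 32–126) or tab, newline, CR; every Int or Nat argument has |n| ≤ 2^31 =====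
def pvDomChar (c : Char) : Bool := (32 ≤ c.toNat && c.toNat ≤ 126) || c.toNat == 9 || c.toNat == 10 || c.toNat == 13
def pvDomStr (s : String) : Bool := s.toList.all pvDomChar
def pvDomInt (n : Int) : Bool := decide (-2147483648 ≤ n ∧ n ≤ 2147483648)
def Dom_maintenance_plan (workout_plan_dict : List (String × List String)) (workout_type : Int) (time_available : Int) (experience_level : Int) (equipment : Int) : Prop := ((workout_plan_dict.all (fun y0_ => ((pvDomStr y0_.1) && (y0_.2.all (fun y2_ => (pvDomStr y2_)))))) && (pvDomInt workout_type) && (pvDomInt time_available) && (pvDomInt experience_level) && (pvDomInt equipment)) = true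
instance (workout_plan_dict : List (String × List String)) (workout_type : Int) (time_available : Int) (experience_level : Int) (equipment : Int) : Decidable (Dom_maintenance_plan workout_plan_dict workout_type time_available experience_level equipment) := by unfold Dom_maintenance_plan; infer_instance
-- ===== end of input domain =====

-- B replaces A's per-day loop (counter + 5-way branch + modular indexing) by a table lookup, a
-- bulk repeat-and-slice producing one description per day, and a single zipped dict.update
-- (objective: alternative; both A and B mutate the dict in place in Python — the equivalence
-- proved here is about the returned dict).

-- ===== PORT A =====
def equipment_level (equipment_choice : Int) : String :=
  if equipment_choice = 1 then "no equipment"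
  else if equipment_choice = 2 then "basic equipment (dumbbells, resistance bands)"
  else if equipment_choice = 3 then "full gym access"
  else "unknown equipment"

-- `options[day_index % len(options)]`: the options lists are nonempty and 0 ≤ i % len < len,
-- so `(pyGet? …).getD ""` never takes its default — an exact port of Python's indexing.
def maintenance_plan (workout_plan_dict : List (String × List String)) (workout_type : Int) (time_available : Int) (experience_level : Int) (equipment : Int) : List (String × List String) :=
  let cardio_options : List String :=
    ["moderate cardio (e.g., jogging, cycling, brisk walking)", "recreational sports (e.g., basketball, tennis)",
     "hiking or trail walking", "dancing or active games", "swimming or water aerobics"]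
  let strength_options : List String :=
    ["balanced strength and endurance training with " ++ equipment_level equipment ++ " (e.g., compound lifts with moderate weight)",
     "full-body resistance training with " ++ equipment_level equipment ++ " for muscle tone",
     "functional strength exercises to improve daily movement with " ++ equipment_level equipment,
     "circuit workout blending strength and cardio with " ++ equipment_level equipment,
     "core and stability training with " ++ equipment_level equipment]
  let flexibility_options : List String :=
    ["mixed stretching and light cardio for overall mobility", "Pilates or Barre for core and flexibility",
     "restorative yoga or deep stretching for recovery", "active recovery walks with light stretching"]
  let hiit_options : List String :=
    ["short HIIT session for cardiovascular health and metabolism boost",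
     "sprint intervals or jump rope drills", "bodyweight HIIT with active rest",
     "circuit of cardio and bodyweight strength intervals"]
  let mixed_options : List String :=
    [PySem.Int.toStr (PySem.Int.floordiv time_available 2) ++ " minutes of cardio and " ++ PySem.Int.toStr (PySem.Int.floordiv time_available 2) ++ " minutes of strength maintenance",
     "balanced workout with a mix of endurance and light resistance",
     "active recovery day with light cardio and stretching",
     "cross-training session (e.g., swim + bodyweight strength)",
     "light gym session with focus on form and controlled movements"]
  let step : (PySem.Dict String (List String) × Int) → String → (PySem.Dict String (List String) × Int) :=
    fun st day =>
      if workout_type = 1 then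
        (st.1.insert day [PySem.Int.toStr time_available ++ " minutes of " ++ (PySem.List.pyGet? cardio_options (PySem.Int.mod st.2 (cardio_options.length : Int))).getD ""], st.2 + 1)
      else if workout_type = 2 then
        (st.1.insert day [PySem.Int.toStr time_available ++ " minutes of " ++ (PySem.List.pyGet? strength_options (PySem.Int.mod st.2 (strength_options.length : Int))).getD ""], st.2 + 1)
      else if workout_type = 3 then
        (st.1.insert day [PySem.Int.toStr time_available ++ " minutes of " ++ (PySem.List.pyGet? flexibility_options (PySem.Int.mod st.2 (flexibility_options.length : Int))).getD ""], st.2 + 1)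
      else if workout_type = 4 then
        (st.1.insert day [PySem.Int.toStr (PySem.Int.floordiv time_available 2) ++ " minutes of " ++ (PySem.List.pyGet? hiit_options (PySem.Int.mod st.2 (hiit_options.length : Int))).getD "" ++ " and " ++ PySem.Int.toStr (PySem.Int.floordiv time_available 2) ++ " minutes of endurance training or active recovery"], st.2 + 1)
      else if workout_type = 5 then
        (st.1.insert day [(PySem.List.pyGet? mixed_options (PySem.Int.mod st.2 (mixed_options.length : Int))).getD ""], st.2 + 1)
      else
        (st.1, st.2 + 1)
  (((PySem.Dict.mk workout_plan_dict).keys).foldl step (PySem.Dict.mk workout_plan_dict, 0)).1.items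

-- ===== PORT B =====
-- `(cycle * k)[:n]` is ported as pyRepeat + slice (exact: 0 ≤ n); the generator feeding
-- dict.update is the fold inserting each zipped (day, [desc]) pair in order (exact).
def maintenance_plan_alt (workout_plan_dict : List (String × List String)) (workout_type : Int) (time_available : Int) (experience_level : Int) (equipment : Int) : List (String × List String) :=
  let eq : String := (PySem.Dict.mk [((1 : Int), "no equipment"), (2, "basic equipment (dumbbells, resistance bands)"), (3, "full gym access")]).getD equipment "unknown equipment"
  let half : Int := PySem.Int.floordiv time_available 2
  let tables : PySem.Dict Int (List String) := PySem.Dict.mk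
    [((1 : Int), (["moderate cardio (e.g., jogging, cycling, brisk walking)", "recreational sports (e.g., basketball, tennis)",
          "hiking or trail walking", "dancing or active games", "swimming or water aerobics"] : List String).map
          (fun o => PySem.Int.toStr time_available ++ " minutes of " ++ o)),
     (2, (["balanced strength and endurance training with " ++ eq ++ " (e.g., compound lifts with moderate weight)",
          "full-body resistance training with " ++ eq ++ " for muscle tone",
          "functional strength exercises to improve daily movement with " ++ eq,
          "circuit workout blending strength and cardio with " ++ eq,
          "core and stability training with " ++ eq] : List String).map
          (fun o => PySem.Int.toStr time_available ++ " minutes of " ++ o)),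
     (3, (["mixed stretching and light cardio for overall mobility", "Pilates or Barre for core and flexibility",
          "restorative yoga or deep stretching for recovery", "active recovery walks with light stretching"] : List String).map
          (fun o => PySem.Int.toStr time_available ++ " minutes of " ++ o)),
     (4, (["short HIIT session for cardiovascular health and metabolism boost",
          "sprint intervals or jump rope drills", "bodyweight HIIT with active rest",
          "circuit of cardio and bodyweight strength intervals"] : List String).map
          (fun o => PySem.Int.toStr half ++ " minutes of " ++ o ++ " and " ++ PySem.Int.toStr half ++ " minutes of endurance training or active recovery")),
     (5, [PySem.Int.toStr half ++ " minutes of cardio and " ++ PySem.Int.toStr half ++ " minutes of strength maintenance",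
          "balanced workout with a mix of endurance and light resistance",
          "active recovery day with light cardio and stretching",
          "cross-training session (e.g., swim + bodyweight strength)",
          "light gym session with focus on form and controlled movements"])]
  match tables.get? workout_type with
  | none => workout_plan_dict
  | some cycle =>
      let days : List String := workout_plan_dict.map (·.1)
      let descs : List String :=
        PySem.List.slice (PySem.List.pyRepeat cycle (PySem.Int.floordiv (days.length : Int) (cycle.length : Int) + 1)) none (some (days.length : Int))
      ((days.zip descs).foldl (fun d p => d.insert p.1 [p.2]) (PySem.Dict.mk workout_plan_dict)).items

-- ===== PRECONDITION & SPEC =====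
def Spec_maintenance_plan (workout_plan_dict : List (String × List String)) (workout_type : Int) (time_available : Int) (experience_level : Int) (equipment : Int) (out : List (String × List String)) : Prop := out = maintenance_plan_alt workout_plan_dict workout_type time_available experience_level equipment
instance (workout_plan_dict : List (String × List String)) (workout_type : Int) (time_available : Int) (experience_level : Int) (equipment : Int) (out : List (String × List String)) : Decidable (Spec_maintenance_plan workout_plan_dict workout_type time_available experience_level equipment out) := by unfold Spec_maintenance_plan; infer_instance

-- ===== CLAIM (what is proved, stated in full; the proofs are below) =====
def Claim_equal_maintenance_plan : Prop := ∀ (workout_plan_dict : List (String × List String)) (workout_type : Int) (time_available : Int) (experience_level : Int) (equipment : Int), Dom_maintenance_plan workout_plan_dict workout_type time_available experience_level equipment → Spec_maintenance_plan workout_plan_dict workout_type time_available experience_level equipment (maintenance_plan workout_plan_dict workout_type time_available experience_level equipment)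

-- ===== LEMMAS AND PROOFS =====

-- A's counter-carrying fold over the keys equals a fold over the enumerated keys.
lemma fold_enum_eq (F : Int → List String) (keys : List String) :
    ∀ (d : PySem.Dict String (List String)) (i : Int),
      (keys.foldl (fun st day => (st.1.insert day (F st.2), st.2 + 1)) (d, i)).1
        = (PySem.List.enumerate keys i).foldl (fun d p => d.insert p.2 (F p.1)) d := by
  induction keys with
  | nil => intro d i; simp [PySem.List.enumerate]
  | cons k ks ih =>
      intro d i
      rw [PySem.List.enumerate_cons]
      simpa using ih (d.insert k (F i)) (i + 1)

-- A fold that only bumps the counter leaves the dict unchanged.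
lemma fold_id_eq (keys : List String) :
    ∀ (d : PySem.Dict String (List String)) (i : Int),
      (keys.foldl (fun (st : PySem.Dict String (List String) × Int) (_ : String) => (st.1, st.2 + 1)) (d, i)).1 = d := by
  induction keys with
  | nil => intro d i; rfl
  | cons k ks ih => intro d i; simpa using ih d (i + 1)

-- Element i of the k-fold repetition of C is C[i % |C|].
lemma flat_getElem? (C : List String) (k i : Nat) (h : i < k * C.length) :
    (List.replicate k C).flatten[i]? = C[i % C.length]? := by
  induction k generalizing i with
  | zero => rw [Nat.zero_mul] at h; omega
  | succ k ih =>
      have hs : (k + 1) * C.length = k * C.length + C.length := Nat.succ_mul _ _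
      have hm : 0 < C.length := by
        rcases Nat.eq_zero_or_pos C.length with h0 | h0
        · rw [h0, Nat.mul_zero] at h; omega
        · exact h0
      rw [List.replicate_succ, List.flatten_cons, List.getElem?_append]
      by_cases hi : i < C.length
      · rw [if_pos hi, Nat.mod_eq_of_lt hi]
      · rw [if_neg hi, ih _ (by omega)]
        congr 1
        exact (Nat.mod_eq_sub_mod (by omega)).symm

-- B's fold over days zipped with the repeated cycle equals the enumerated fold with
-- modular indexing into the cycle.
lemma zip_fold (C : List String) (k : Nat) (days : List String) :
    ∀ (i : Nat) (d : PySem.Dict String (List String)), i + days.length ≤ k * C.length →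
      ((days.zip (((List.replicate k C).flatten.drop i).take days.length)).foldl
          (fun d p => d.insert p.1 [p.2]) d)
        = (PySem.List.enumerate days (i : Int)).foldl
            (fun d p => d.insert p.2 [(PySem.List.pyGet? C (PySem.Int.mod p.1 (C.length : Int))).getD ""]) d := by
  induction days with
  | nil => intro i d _; simp [PySem.List.enumerate]
  | cons day ds ih =>
      intro i d hle
      rw [List.length_cons] at hle
      have hm : 0 < C.length := by
        rcases Nat.eq_zero_or_pos C.length with h0 | h0
        · rw [h0, Nat.mul_zero] at hle; omega
        · exact h0
      have hfl : ((List.replicate k C).flatten).length = k * C.length := by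
        simp [List.length_flatten, List.map_replicate, List.sum_replicate]
      have hilt : i < ((List.replicate k C).flatten).length := by omega
      rw [List.drop_eq_getElem_cons hilt, List.length_cons, List.take_succ_cons,
          List.zip_cons_cons, List.foldl_cons, PySem.List.enumerate_cons, List.foldl_cons]
      have h2 : i % C.length < C.length := Nat.mod_lt _ hm
      have hgv : ((List.replicate k C).flatten)[i] = C[i % C.length] := by
        have h1 := flat_getElem? C k i (by omega)
        rw [List.getElem?_eq_getElem hilt, List.getElem?_eq_getElem h2] at h1
        exact Option.some.inj h1
      have hget : ((List.replicate k C).flatten)[i] = (PySem.List.pyGet? C (PySem.Int.mod (i : Int) (C.length : Int))).getD "" := by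
        rw [PySem.Int.mod_natCast, PySem.List.pyGet?_natCast, List.getElem?_eq_getElem h2, Option.getD_some, hgv]
      rw [hget]
      have := ih (i + 1) (d.insert day [(PySem.List.pyGet? C (PySem.Int.mod (i : Int) (C.length : Int))).getD ""]) (by omega)
      rw [Nat.cast_add, Nat.cast_one] at this
      exact this

-- n is strictly below (n / m + 1) * m for positive m.
lemma n_le_repeat (n m : Nat) (hm : 0 < m) : n ≤ (n / m + 1) * m := by
  have h1 := Nat.div_add_mod n m
  have h2 := Nat.mod_lt n hm
  calc n = m * (n / m) + n % m := h1.symm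
    _ ≤ m * (n / m) + m := by omega
    _ = (n / m + 1) * m := by ring

-- B's whole some-branch equals the enumerated fold (top-level form).
lemma b_branch_eq (C : List String) (hC : 0 < C.length) (wpd : List (String × List String)) :
    ((((wpd.map (·.1)).zip
        (PySem.List.slice (PySem.List.pyRepeat C (PySem.Int.floordiv ((wpd.map (·.1)).length : Int) ((C.length : Int))  + 1)) none (some ((wpd.map (·.1)).length : Int)))).foldl
        (fun d p => d.insert p.1 [p.2]) (PySem.Dict.mk wpd)))
      = (PySem.List.enumerate (wpd.map (·.1)) 0).foldl
          (fun d p => d.insert p.2 [(PySem.List.pyGet? C (PySem.Int.mod p.1 (C.length : Int))).getD ""]) (PySem.Dict.mk wpd) := by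
  set days := wpd.map (·.1) with hdays
  have hk : PySem.Int.floordiv ((days.length : Int)) ((C.length : Int)) + 1 = ((days.length / C.length + 1 : Nat) : Int) := by
    rw [PySem.Int.floordiv_natCast]; push_cast; ring
  rw [hk, PySem.List.slice_to_natCast]
  unfold PySem.List.pyRepeat
  have htk : ((days.length / C.length + 1 : Nat) : Int).toNat = days.length / C.length + 1 := Int.toNat_natCast _
  rw [htk]
  have := zip_fold C (days.length / C.length + 1) days 0 (PySem.Dict.mk wpd)
    (by simpa using n_le_repeat days.length C.length hC)
  simpa using this

-- Indexing the mapped cycle at i % len is mapping the indexed option.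
lemma cyc_map (g : String → String) (l : List String) (hl : 0 < l.length) (i : Int) :
    (PySem.List.pyGet? (l.map g) (PySem.Int.mod i ((l.map g).length : Int))).getD ""
      = g ((PySem.List.pyGet? l (PySem.Int.mod i (l.length : Int))).getD "") := by
  have hpos : (0 : Int) < (l.length : Int) := by exact_mod_cast hl
  rw [List.length_map]
  have h0 : 0 ≤ PySem.Int.mod i (l.length : Int) := PySem.Int.mod_nonneg i hpos
  have hlt : PySem.Int.mod i (l.length : Int) < (l.length : Int) := PySem.Int.mod_lt i hpos
  have ht : (PySem.Int.mod i (l.length : Int)).toNat < l.length := by omega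
  rw [PySem.List.pyGet?_of_nonneg _ h0, PySem.List.pyGet?_of_nonneg _ h0]
  simp [List.getElem?_map, List.getElem?_eq_getElem ht]

-- B's equipment dict lookup is A's equipment_level helper.
lemma eq_dict_eq (q : Int) :
    (PySem.Dict.mk [((1 : Int), "no equipment"), (2, "basic equipment (dumbbells, resistance bands)"), (3, "full gym access")]).getD q "unknown equipment"
      = equipment_level q := by
  by_cases h1 : q = 1
  · subst h1; decide
  by_cases h2 : q = 2
  · subst h2; decide
  by_cases h3 : q = 3
  · subst h3; decide
  have n1 : ¬ (1 : Int) = q := fun h => h1 h.symm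
  have n2 : ¬ (2 : Int) = q := fun h => h2 h.symm
  have n3 : ¬ (3 : Int) = q := fun h => h3 h.symm
  simp [equipment_level, h1, h2, h3, n1, n2, n3, PySem.Dict.getD_eq_get?_getD, PySem.Dict.get?]

-- ===== VERDICT (by name: the statement is the Claim_ definition above) =====
theorem maintenance_plan_spec : Claim_equal_maintenance_plan := by
  intro wpd wt t e q _
  unfold Spec_maintenance_plan maintenance_plan maintenance_plan_alt
  simp only [eq_dict_eq]
  by_cases h1 : wt = 1
  · subst h1
    simp only [Int.reduceEq, reduceIte, PySem.Dict.get?_mk_cons, beq_self_eq_true, if_true, beq_iff_eq]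
    rw [fold_enum_eq (fun j => [PySem.Int.toStr t ++ " minutes of " ++ (PySem.List.pyGet? (["moderate cardio (e.g., jogging, cycling, brisk walking)", "recreational sports (e.g., basketball, tennis)", "hiking or trail walking", "dancing or active games", "swimming or water aerobics"] : List String) (PySem.Int.mod j ((["moderate cardio (e.g., jogging, cycling, brisk walking)", "recreational sports (e.g., basketball, tennis)", "hiking or trail walking", "dancing or active games", "swimming or water aerobics"] : List String).length : Int))).getD ""])]
    rw [b_branch_eq _ (by simp)]
    simp only [PySem.Dict.keys_mk]
    congr 1
    congr 1
    funext d p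
    rw [cyc_map (fun o => PySem.Int.toStr t ++ " minutes of " ++ o) (["moderate cardio (e.g., jogging, cycling, brisk walking)", "recreational sports (e.g., basketball, tennis)", "hiking or trail walking", "dancing or active games", "swimming or water aerobics"] : List String) (by simp) p.1]
  by_cases h2 : wt = 2
  · subst h2
    simp only [Int.reduceEq, reduceIte, PySem.Dict.get?_mk_cons, beq_self_eq_true, if_true, beq_iff_eq]
    rw [fold_enum_eq (fun j => [PySem.Int.toStr t ++ " minutes of " ++ (PySem.List.pyGet? (["balanced strength and endurance training with " ++ equipment_level q ++ " (e.g., compound lifts with moderate weight)", "full-body resistance training with " ++ equipment_level q ++ " for muscle tone", "functional strength exercises to improve daily movement with " ++ equipment_level q, "circuit workout blending strength and cardio with " ++ equipment_level q, "core and stability training with " ++ equipment_level q] : List String) (PySem.Int.mod j ((["balanced strength and endurance training with " ++ equipment_level q ++ " (e.g., compound lifts with moderate weight)", "full-body resistance training with " ++ equipment_level q ++ " for muscle tone", "functional strength exercises to improve daily movement with " ++ equipment_level q, "circuit workout blending strength and cardio with " ++ equipment_level q, "core and stability training with " ++ equipment_level q] : List String).length : Int))).getD ""])]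
    rw [b_branch_eq _ (by simp)]
    simp only [PySem.Dict.keys_mk]
    congr 1
    congr 1
    funext d p
    rw [cyc_map (fun o => PySem.Int.toStr t ++ " minutes of " ++ o) (["balanced strength and endurance training with " ++ equipment_level q ++ " (e.g., compound lifts with moderate weight)", "full-body resistance training with " ++ equipment_level q ++ " for muscle tone", "functional strength exercises to improve daily movement with " ++ equipment_level q, "circuit workout blending strength and cardio with " ++ equipment_level q, "core and stability training with " ++ equipment_level q] : List String) (by simp) p.1]
  by_cases h3 : wt = 3
  · subst h3
    simp only [Int.reduceEq, reduceIte, PySem.Dict.get?_mk_cons, beq_self_eq_true, if_true, beq_iff_eq]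
    rw [fold_enum_eq (fun j => [PySem.Int.toStr t ++ " minutes of " ++ (PySem.List.pyGet? (["mixed stretching and light cardio for overall mobility", "Pilates or Barre for core and flexibility", "restorative yoga or deep stretching for recovery", "active recovery walks with light stretching"] : List String) (PySem.Int.mod j ((["mixed stretching and light cardio for overall mobility", "Pilates or Barre for core and flexibility", "restorative yoga or deep stretching for recovery", "active recovery walks with light stretching"] : List String).length : Int))).getD ""])]
    rw [b_branch_eq _ (by simp)]
    simp only [PySem.Dict.keys_mk]
    congr 1
    congr 1
    funext d p
    rw [cyc_map (fun o => PySem.Int.toStr t ++ " minutes of " ++ o) (["mixed stretching and light cardio for overall mobility", "Pilates or Barre for core and flexibility", "restorative yoga or deep stretching for recovery", "active recovery walks with light stretching"] : List String) (by simp) p.1]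
  by_cases h4 : wt = 4
  · subst h4
    simp only [Int.reduceEq, reduceIte, PySem.Dict.get?_mk_cons, beq_self_eq_true, if_true, beq_iff_eq]
    rw [fold_enum_eq (fun j => [PySem.Int.toStr (PySem.Int.floordiv t 2) ++ " minutes of " ++ (PySem.List.pyGet? (["short HIIT session for cardiovascular health and metabolism boost", "sprint intervals or jump rope drills", "bodyweight HIIT with active rest", "circuit of cardio and bodyweight strength intervals"] : List String) (PySem.Int.mod j ((["short HIIT session for cardiovascular health and metabolism boost", "sprint intervals or jump rope drills", "bodyweight HIIT with active rest", "circuit of cardio and bodyweight strength intervals"] : List String).length : Int))).getD "" ++ " and " ++ PySem.Int.toStr (PySem.Int.floordiv t 2) ++ " minutes of endurance training or active recovery"])]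
    rw [b_branch_eq _ (by simp)]
    simp only [PySem.Dict.keys_mk]
    congr 1
    congr 1
    funext d p
    rw [cyc_map (fun o => PySem.Int.toStr (PySem.Int.floordiv t 2) ++ " minutes of " ++ o ++ " and " ++ PySem.Int.toStr (PySem.Int.floordiv t 2) ++ " minutes of endurance training or active recovery") (["short HIIT session for cardiovascular health and metabolism boost", "sprint intervals or jump rope drills", "bodyweight HIIT with active rest", "circuit of cardio and bodyweight strength intervals"] : List String) (by simp) p.1]
  by_cases h5 : wt = 5
  · subst h5
    simp only [Int.reduceEq, reduceIte, PySem.Dict.get?_mk_cons, beq_self_eq_true, if_true, beq_iff_eq]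
    rw [fold_enum_eq (fun j => [(PySem.List.pyGet? ([PySem.Int.toStr (PySem.Int.floordiv t 2) ++ " minutes of cardio and " ++ PySem.Int.toStr (PySem.Int.floordiv t 2) ++ " minutes of strength maintenance", "balanced workout with a mix of endurance and light resistance", "active recovery day with light cardio and stretching", "cross-training session (e.g., swim + bodyweight strength)", "light gym session with focus on form and controlled movements"] : List String) (PySem.Int.mod j (([PySem.Int.toStr (PySem.Int.floordiv t 2) ++ " minutes of cardio and " ++ PySem.Int.toStr (PySem.Int.floordiv t 2) ++ " minutes of strength maintenance", "balanced workout with a mix of endurance and light resistance", "active recovery day with light cardio and stretching", "cross-training session (e.g., swim + bodyweight strength)", "light gym session with focus on form and controlled movements"] : List String).length : Int))).getD ""])]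
    rw [b_branch_eq _ (by simp)]
    simp only [PySem.Dict.keys_mk]
  · have n1 : ¬ ((1 : Int) == wt) = true := by simpa using fun h => h1 h.symm
    have n2 : ¬ ((2 : Int) == wt) = true := by simpa using fun h => h2 h.symm
    have n3 : ¬ ((3 : Int) == wt) = true := by simpa using fun h => h3 h.symm
    have n4 : ¬ ((4 : Int) == wt) = true := by simpa using fun h => h4 h.symm
    have n5 : ¬ ((5 : Int) == wt) = true := by simpa using fun h => h5 h.symm
    simp only [if_neg h1, if_neg h2, if_neg h3, if_neg h4, if_neg h5,
      PySem.Dict.get?_mk_cons, if_neg n1, if_neg n2, if_neg n3, if_neg n4, if_neg n5]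
    rw [fold_id_eq]
    rfl
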